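-- pv_equiv track=rewrite | github.com/tomi1368/pycorregido | AnseLattanzioRodriguez_tp1_2.py | automata_cte
-- ===== SOURCE A (Python) =====
-- ESTADO_FINAL ="ESTADO FINAL"
--
-- ESTADO_NO_FINAL ="ESTADO NO FINAL"
--
-- ESTADO_TRAMPA = "ESTADO TRAMPA"
--
-- def automata_cte(n):
--     estado_actual = 0
--     estados_finales =[1,2,4]
--     for i in n:
--         if estado_actual == 0 and i == "0":
--             estado_actual = 2
--         elif estado_actual == 0 and i in ["1","2","3","4","5","6","7","8","9"]:
--             estado_actual = 1
--         elif estado_actual == 1 and i in ["0","1","2","3","4","5","6","7","8","9"]: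
--             estado_actual = 1
--         elif estado_actual == 1 and i ==".":
--             estado_actual = 3
--         elif estado_actual == 2 and i == ".":
--             estado_actual = 3
--         elif estado_actual == 3 and i in ["0","1","2","3","4","5","6","7","8","9"]:
--             estado_actual = 4
--         elif estado_actual == 4 and i in ["0","1","2","3","4","5","6","7","8","9"]:
--             estado_actual = 4
--         else:
--             estado_actual = -1
--             break
--     if estado_actual  == -1:
--          return ESTADO_TRAMPA
--     if estado_actual in estados_finales:
--         return ESTADO_FINAL
--     else:
--         return ESTADO_NO_FINAL
-- ===== SOURCE B (Python) =====
-- ESTADO_FINAL = "ESTADO FINAL"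
--
-- ESTADO_NO_FINAL = "ESTADO NO FINAL"
--
-- ESTADO_TRAMPA = "ESTADO TRAMPA"
--
--
-- def automata_cte(n):
--     # Parse the string shape directly: split at the first '.', then judge the
--     # integer part (digits, no leading zero unless it is exactly "0") and the
--     # fractional part (digits; empty = incomplete, i.e. non-final).
--     if "." in n:
--         intpart, _, frac = n.partition(".")
--     else:
--         intpart, frac = n, None
--     int_ok = intpart.isdigit() and (intpart == "0" or not intpart.startswith("0"))
--     if frac is None:
--         if n == "":
--             return ESTADO_NO_FINAL
--         return ESTADO_FINAL if int_ok else ESTADO_TRAMPA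
--     if not int_ok:
--         return ESTADO_TRAMPA
--     if frac == "":
--         return ESTADO_NO_FINAL
--     return ESTADO_FINAL if frac.isdigit() else ESTADO_TRAMPA
-- ===== Notes on version B (the rewrite author's own statement) =====
-- stated objective: simpler
-- what changed: Replaces the explicit 7-state DFA transition loop with a direct shape parse: split the string at the first '.' and judge the integer part (digits, no leading zero unless exactly "0") and fractional part (digits, empty = non-final) with str.isdigit.
import Mathlib
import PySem

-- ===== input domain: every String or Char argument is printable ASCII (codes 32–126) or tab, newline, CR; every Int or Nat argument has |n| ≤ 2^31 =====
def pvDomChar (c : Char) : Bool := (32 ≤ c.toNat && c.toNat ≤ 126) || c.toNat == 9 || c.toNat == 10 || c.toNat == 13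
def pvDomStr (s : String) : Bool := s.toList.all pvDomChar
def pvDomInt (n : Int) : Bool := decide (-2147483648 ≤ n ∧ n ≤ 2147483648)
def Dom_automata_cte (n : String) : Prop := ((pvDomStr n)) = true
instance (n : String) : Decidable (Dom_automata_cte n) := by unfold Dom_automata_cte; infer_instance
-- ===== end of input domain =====

set_option maxRecDepth 65536


-- B replaces A's explicit DFA transition loop with a direct shape parse (split at the
-- first '.'; judge integer and fractional parts with isdigit); objective: simpler.

-- ===== PORT A =====
def pvDigits10 : List Char := ['0','1','2','3','4','5','6','7','8','9']
def pvDigits19 : List Char := ['1','2','3','4','5','6','7','8','9']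

def pvStepA (s : Int) (c : Char) : Int :=
  if s == 0 && c == '0' then 2
  else if s == 0 && pvDigits19.contains c then 1
  else if s == 1 && pvDigits10.contains c then 1
  else if s == 1 && c == '.' then 3
  else if s == 2 && c == '.' then 3
  else if s == 3 && pvDigits10.contains c then 4
  else if s == 4 && pvDigits10.contains c then 4
  else -1

-- the for-loop; reaching the else branch sets -1 and breaks
def pvRunA : Int → List Char → Int
  | s, [] => s
  | s, c :: cs =>
    let s' := pvStepA s c
    if s' == -1 then -1 else pvRunA s' cs

def automata_cte (n : String) : String :=
  let f := pvRunA 0 n.toList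
  if f == -1 then "ESTADO TRAMPA"
  else if ([1, 2, 4] : List Int).contains f then "ESTADO FINAL"
  else "ESTADO NO FINAL"

-- ===== PORT B =====
def automata_cte_alt (n : String) : String :=
  let l := n.toList
  -- n.partition(".") ported by hand: split at the first '.' (exact for the one-char separator)
  let part : List Char × Option (List Char) :=
    if l.contains '.' then (l.takeWhile (· != '.'), some ((l.dropWhile (· != '.')).tail))
    else (l, none)
  let int_ok := PySem.Chars.strIsdigit part.1 &&
      (part.1 == ['0'] || !(PySem.Chars.startswith part.1 ['0']))
  match part.2 with
  | none =>
      if l.isEmpty then "ESTADO NO FINAL"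
      else if int_ok then "ESTADO FINAL" else "ESTADO TRAMPA"
  | some frac =>
      if !int_ok then "ESTADO TRAMPA"
      else if frac.isEmpty then "ESTADO NO FINAL"
      else if PySem.Chars.strIsdigit frac then "ESTADO FINAL" else "ESTADO TRAMPA"

-- ===== PRECONDITION & SPEC =====
def Spec_automata_cte (n : String) (out : String) : Prop := out = automata_cte_alt n
instance (n : String) (out : String) : Decidable (Spec_automata_cte n out) := by unfold Spec_automata_cte; infer_instance

-- ===== CLAIM (what is proved, stated in full; the proofs are below) =====
def Claim_equal_automata_cte : Prop := ∀ (n : String), Dom_automata_cte n → Spec_automata_cte n (automata_cte n)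

-- ===== LEMMAS AND PROOFS =====

-- list-level copies of the two port bodies (proof helpers only)
def aOut (l : List Char) : String :=
  let f := pvRunA 0 l
  if f == -1 then "ESTADO TRAMPA"
  else if ([1, 2, 4] : List Int).contains f then "ESTADO FINAL"
  else "ESTADO NO FINAL"

def bOut (l : List Char) : String :=
  let part : List Char × Option (List Char) :=
    if l.contains '.' then (l.takeWhile (· != '.'), some ((l.dropWhile (· != '.')).tail))
    else (l, none)
  let int_ok := PySem.Chars.strIsdigit part.1 &&
      (part.1 == ['0'] || !(PySem.Chars.startswith part.1 ['0']))
  match part.2 with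
  | none =>
      if l.isEmpty then "ESTADO NO FINAL"
      else if int_ok then "ESTADO FINAL" else "ESTADO TRAMPA"
  | some frac =>
      if !int_ok then "ESTADO TRAMPA"
      else if frac.isEmpty then "ESTADO NO FINAL"
      else if PySem.Chars.strIsdigit frac then "ESTADO FINAL" else "ESTADO TRAMPA"

theorem digs10_eq (c : Char) : (c ∈ pvDigits10) ↔ PySem.Chars.isdigit c = true := by
  rcases c with ⟨v, hv⟩
  simp only [pvDigits10, PySem.Chars.isdigit, List.mem_cons, List.not_mem_nil, or_false]
  simp only [decide_eq_true_iff, Bool.and_eq_true, Char.le_def, Char.ext_iff]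
  change (v = 48 ∨ v = 49 ∨ v = 50 ∨ v = 51 ∨ v = 52 ∨ v = 53 ∨ v = 54 ∨ v = 55 ∨ v = 56 ∨ v = 57) ↔ (48 ≤ v ∧ v ≤ 57)
  rcases v with ⟨⟨v, hv'⟩⟩
  simp only [UInt32.le_iff_toNat_le, ← UInt32.toNat_inj, UInt32.toNat_ofNat]
  omega

theorem digs19_eq (c : Char) : (c ∈ pvDigits19) ↔ (PySem.Chars.isdigit c = true ∧ ¬ c = '0') := by
  rcases c with ⟨v, hv⟩
  simp only [pvDigits19, PySem.Chars.isdigit, List.mem_cons, List.not_mem_nil, or_false]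
  simp only [decide_eq_true_iff, Bool.and_eq_true, Char.le_def, Char.ext_iff]
  change (v = 49 ∨ v = 50 ∨ v = 51 ∨ v = 52 ∨ v = 53 ∨ v = 54 ∨ v = 55 ∨ v = 56 ∨ v = 57) ↔ ((48 ≤ v ∧ v ≤ 57) ∧ ¬ v = 48)
  rcases v with ⟨⟨v, hv'⟩⟩
  simp only [UInt32.le_iff_toNat_le, ← UInt32.toNat_inj, UInt32.toNat_ofNat]
  omega

theorem run4_eq (l : List Char) :
    pvRunA 4 l = if l.all PySem.Chars.isdigit then 4 else -1 := by
  induction l with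
  | nil => simp [pvRunA]
  | cons c cs ih =>
    cases hd : PySem.Chars.isdigit c <;>
      simp [pvRunA, pvStepA, digs10_eq, hd, ih]

theorem run3_eq (l : List Char) :
    pvRunA 3 l = if l = [] then 3 else if l.all PySem.Chars.isdigit then 4 else -1 := by
  cases l with
  | nil => simp [pvRunA]
  | cons c cs =>
    cases hd : PySem.Chars.isdigit c <;>
      simp [pvRunA, pvStepA, digs10_eq, hd, run4_eq]

theorem run1_eq (l : List Char) :
    pvRunA 1 l =
      if l.all PySem.Chars.isdigit then 1
      else if (l.dropWhile PySem.Chars.isdigit).head? = some '.' then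
        pvRunA 3 (l.dropWhile PySem.Chars.isdigit).tail
      else -1 := by
  induction l with
  | nil => simp [pvRunA]
  | cons c cs ih =>
    by_cases hd : PySem.Chars.isdigit c = true
    · simpa [pvRunA, pvStepA, digs10_eq, hd] using ih
    · by_cases hdot : c = '.'
      · subst hdot
        simp [pvRunA, pvStepA, digs10_eq, hd]
      · simp [pvRunA, pvStepA, digs10_eq, hd, hdot]

theorem takeWhile_all_append (p : Char → Bool) (ds rest : List Char)
    (h : ∀ a ∈ ds, p a = true) :
    (ds ++ rest).takeWhile p = ds ++ rest.takeWhile p := by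
  induction ds with
  | nil => simp
  | cons d ds ih =>
    have hd := h d (List.mem_cons_self ..)
    simp only [List.cons_append, List.takeWhile_cons, hd, if_true]
    rw [ih (fun a ha => h a (List.mem_cons_of_mem _ ha))]

theorem dropWhile_all_append (p : Char → Bool) (ds rest : List Char)
    (h : ∀ a ∈ ds, p a = true) :
    (ds ++ rest).dropWhile p = rest.dropWhile p := by
  induction ds with
  | nil => simp
  | cons d ds ih =>
    have hd := h d (List.mem_cons_self ..)
    simp only [List.cons_append, List.dropWhile_cons, hd, if_true]
    exact ih (fun a ha => h a (List.mem_cons_of_mem _ ha))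

theorem dig_ne_dot (a : Char) (h : PySem.Chars.isdigit a = true) : (a != '.') = true := by
  rcases eq_or_ne a '.' with rfl | hne
  · simp [PySem.Chars.isdigit] at h
  · simp [hne]

theorem dropWhile_head_false (p : Char → Bool) (l t : List Char) (e : Char)
    (h : l.dropWhile p = e :: t) : p e = false := by
  induction l with
  | nil => simp at h
  | cons a l ih =>
    rw [List.dropWhile_cons] at h
    by_cases hp : p a = true
    · simp [hp] at h; exact ih h
    · simp [hp] at h; exact h.1 ▸ (by simpa using hp)

-- pvRunA 3 t (after a valid integer part and a dot) agrees with B's judgement of frac = t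
theorem frac_eq (t : List Char) :
    (if pvRunA 3 t == -1 then "ESTADO TRAMPA"
     else if ([1, 2, 4] : List Int).contains (pvRunA 3 t) then "ESTADO FINAL"
     else "ESTADO NO FINAL")
    = (if t.isEmpty then "ESTADO NO FINAL"
       else if PySem.Chars.strIsdigit t then "ESTADO FINAL" else "ESTADO TRAMPA") := by
  rw [run3_eq]
  rcases t with _ | ⟨f, t'⟩
  · rfl
  · have hcn : (f :: t' : List Char) ≠ [] := by simp
    rw [if_neg hcn]
    by_cases hall : (f :: t').all PySem.Chars.isdigit = true
    · have hsd : PySem.Chars.strIsdigit (f :: t') = true := by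
        simp [PySem.Chars.strIsdigit, hall]
      rw [if_pos hall, hsd]
      rfl
    · have hall' : (f :: t').all PySem.Chars.isdigit = false := by simpa using hall
      have hsd : PySem.Chars.strIsdigit (f :: t') = false := by
        simp [PySem.Chars.strIsdigit, hall']
      rw [if_neg hall, hsd]
      rfl

-- case l = '0' :: '.' :: t
theorem ab_zero_dot (t : List Char) : aOut ('0' :: '.' :: t) = bOut ('0' :: '.' :: t) := by
  unfold aOut bOut
  have hA : pvRunA 0 ('0' :: '.' :: t) = pvRunA 3 t := by
    norm_num [pvRunA, pvStepA]
  rw [hA]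
  have hB1 : List.takeWhile (fun x => x != '.') ('0' :: '.' :: t) = ['0'] := by
    rw [List.takeWhile_cons, if_pos (by decide), List.takeWhile_cons, if_neg (by decide)]
  have hB2 : List.dropWhile (fun x => x != '.') ('0' :: '.' :: t) = '.' :: t := by
    rw [List.dropWhile_cons, if_pos (by decide), List.dropWhile_cons, if_neg (by decide)]
  have hB3 : ('0' :: '.' :: t).contains '.' = true := by simp
  rw [hB3]
  simp only [if_true]
  simp only [hB1, hB2, List.tail_cons]
  have hok : (PySem.Chars.strIsdigit ['0'] &&
      (['0'] == ['0'] || !(PySem.Chars.startswith ['0'] ['0']))) = true := by decide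
  rw [hok]
  simpa using frac_eq t

-- case l = '0' :: c2 :: t with c2 ≠ '.'
theorem ab_zero_other (c2 : Char) (t : List Char) (h2 : ¬ c2 = '.') :
    aOut ('0' :: c2 :: t) = bOut ('0' :: c2 :: t) := by
  unfold aOut bOut
  have hb : (c2 != '.') = true := by simp [h2]
  have hA : pvRunA 0 ('0' :: c2 :: t) = -1 := by
    norm_num [pvRunA, pvStepA, h2, digs10_eq, digs19_eq]
  rw [hA]
  have h2' : ¬ ('.' : Char) = c2 := fun h => h2 h.symm
  have hne0 : ¬ ('.' : Char) = '0' := by decide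
  have hne0' : ¬ ('0' : Char) = '.' := by decide
  by_cases hm : ('.' : Char) ∈ t <;>
    norm_num [hm, h2', hne0, hne0', hb, List.takeWhile_cons, List.dropWhile_cons,
      PySem.Chars.strIsdigit, PySem.Chars.startswith, List.isPrefixOf]

-- case head digit 1-9, the whole tail all digits
theorem ab_digit_all (c : Char) (cs : List Char) (hd : PySem.Chars.isdigit c = true)
    (h0 : ¬ c = '0') (hall : cs.all PySem.Chars.isdigit = true) :
    aOut (c :: cs) = bOut (c :: cs) := by
  unfold aOut bOut
  have hA : pvRunA 0 (c :: cs) = 1 := by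
    norm_num [pvRunA, pvStepA, digs19_eq, hd, h0, run1_eq, hall]
  rw [hA]
  have hm : ('.' : Char) ∉ (c :: cs) := by
    intro hmem
    rcases List.mem_cons.mp hmem with h | h
    · exact absurd h.symm (by rintro rfl; simp [PySem.Chars.isdigit] at hd)
    · have := List.all_eq_true.mp hall _ h
      simp [PySem.Chars.isdigit] at this
  have hc : List.contains (c :: cs) '.' = false := by
    simpa [List.contains_eq_mem] using hm
  rw [hc]
  have h0' : ¬ ('0' : Char) = c := fun h => h0 h.symm
  norm_num [hd, h0', hall, List.all_eq_true.mp hall, PySem.Chars.strIsdigit,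
    PySem.Chars.startswith, List.isPrefixOf]

-- case head digit 1-9, digits ds, then a dot
theorem ab_digit_dot (c : Char) (ds t : List Char) (hd : PySem.Chars.isdigit c = true)
    (h0 : ¬ c = '0') (hds : ∀ a ∈ ds, PySem.Chars.isdigit a = true) :
    aOut (c :: (ds ++ '.' :: t)) = bOut (c :: (ds ++ '.' :: t)) := by
  unfold aOut bOut
  have hds' : ∀ a ∈ ds, (a != '.') = true := fun a ha => dig_ne_dot a (hds a ha)
  have hA : pvRunA 0 (c :: (ds ++ '.' :: t)) = pvRunA 3 t := by
    have h1 : pvRunA 0 (c :: (ds ++ '.' :: t)) = pvRunA 1 (ds ++ '.' :: t) := by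
      norm_num [pvRunA, pvStepA, digs19_eq, hd, h0]
    rw [h1, run1_eq, dropWhile_all_append _ _ _ hds]
    have hnall : ¬ ((ds ++ '.' :: t).all PySem.Chars.isdigit = true) := by
      intro h
      have := List.all_eq_true.mp h '.' (by simp)
      simp [PySem.Chars.isdigit] at this
    have hdig : PySem.Chars.isdigit '.' = false := by decide
    norm_num [hnall, List.dropWhile_cons, hdig]
  rw [hA]
  have hcd : (c != '.') = true := dig_ne_dot c hd
  have hB1 : List.takeWhile (fun x => x != '.') (c :: (ds ++ '.' :: t)) = c :: ds := by
    rw [List.takeWhile_cons, if_pos hcd, takeWhile_all_append _ _ _ hds']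
    norm_num
  have hB2 : List.dropWhile (fun x => x != '.') (c :: (ds ++ '.' :: t)) = '.' :: t := by
    rw [List.dropWhile_cons, if_pos hcd, dropWhile_all_append _ _ _ hds']
    norm_num
  have hB3 : (c :: (ds ++ '.' :: t)).contains '.' = true := by simp
  rw [hB3]
  simp only [if_true]
  simp only [hB1, hB2, List.tail_cons]
  have h0' : ¬ ('0' : Char) = c := fun h => h0 h.symm
  have hok : (PySem.Chars.strIsdigit (c :: ds) &&
      ((c :: ds) == ['0'] || !(PySem.Chars.startswith (c :: ds) ['0']))) = true := by
    norm_num [PySem.Chars.strIsdigit, hd, hds, PySem.Chars.startswith, List.isPrefixOf, h0']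
    exact hds
  rw [hok]
  simpa using frac_eq t

-- case head digit 1-9, digits ds, then a non-digit e that is not a dot
theorem ab_digit_other (c : Char) (ds t : List Char) (e : Char)
    (hd : PySem.Chars.isdigit c = true) (h0 : ¬ c = '0')
    (hds : ∀ a ∈ ds, PySem.Chars.isdigit a = true)
    (hed : PySem.Chars.isdigit e = false) (he : ¬ e = '.') :
    aOut (c :: (ds ++ e :: t)) = bOut (c :: (ds ++ e :: t)) := by
  unfold aOut bOut
  have hds' : ∀ a ∈ ds, (a != '.') = true := fun a ha => dig_ne_dot a (hds a ha)
  have hbe : (e != '.') = true := by simp [he]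
  have hA : pvRunA 0 (c :: (ds ++ e :: t)) = -1 := by
    have h1 : pvRunA 0 (c :: (ds ++ e :: t)) = pvRunA 1 (ds ++ e :: t) := by
      norm_num [pvRunA, pvStepA, digs19_eq, hd, h0]
    rw [h1, run1_eq, dropWhile_all_append _ _ _ hds]
    have hnall : ¬ ((ds ++ e :: t).all PySem.Chars.isdigit = true) := by
      intro h
      have := List.all_eq_true.mp h e (by simp)
      rw [hed] at this
      exact Bool.false_ne_true this
    norm_num [hnall, List.dropWhile_cons, hed, he]
  rw [hA]
  have hcd : (c != '.') = true := dig_ne_dot c hd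
  have hsd1 : PySem.Chars.strIsdigit (c :: (ds ++ e :: t)) = false := by
    simp [PySem.Chars.strIsdigit, List.all_append, hed]
  have hsd2 : PySem.Chars.strIsdigit
      (List.takeWhile (fun x => x != '.') (c :: (ds ++ e :: t))) = false := by
    rw [List.takeWhile_cons, if_pos hcd, takeWhile_all_append _ _ _ hds',
      List.takeWhile_cons, if_pos hbe]
    simp [PySem.Chars.strIsdigit, List.all_append, hed]
  cases hc : (c :: (ds ++ e :: t)).contains '.'
  · simp [hsd1]
  · simp [hsd2]

-- case head not a digit
theorem ab_nondigit (c : Char) (cs : List Char) (hd : PySem.Chars.isdigit c = false) :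
    aOut (c :: cs) = bOut (c :: cs) := by
  unfold aOut bOut
  have hc0 : ¬ c = '0' := by rintro rfl; simp [PySem.Chars.isdigit] at hd
  have hA : pvRunA 0 (c :: cs) = -1 := by
    norm_num [pvRunA, pvStepA, digs10_eq, digs19_eq, hd, hc0]
  rw [hA]
  by_cases hdot : c = '.'
  · subst hdot
    have hB1 : List.takeWhile (fun x => x != '.') ('.' :: cs) = [] := by norm_num
    have hB3 : (('.' : Char) :: cs).contains '.' = true := by simp
    rw [hB3]
    simp only [if_true]
    simp [hB1, PySem.Chars.strIsdigit]
  · have hcd : (c != '.') = true := by simp [hdot]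
    have hsd1 : PySem.Chars.strIsdigit (c :: cs) = false := by
      simp [PySem.Chars.strIsdigit, hd]
    have hsd2 : PySem.Chars.strIsdigit
        (List.takeWhile (fun x => x != '.') (c :: cs)) = false := by
      rw [List.takeWhile_cons, if_pos hcd]
      simp [PySem.Chars.strIsdigit, hd]
    cases hc : (c :: cs).contains '.'
    · simp [hsd1]
    · simp [hsd2]

theorem ab_all (l : List Char) : aOut l = bOut l := by
  cases l with
  | nil => rfl
  | cons c cs =>
    by_cases hd : PySem.Chars.isdigit c = true
    · by_cases h0 : c = '0'
      · subst h0
        cases cs with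
        | nil => rfl
        | cons c2 t =>
          by_cases h2 : c2 = '.'
          · subst h2; exact ab_zero_dot t
          · exact ab_zero_other c2 t h2
      · rcases hdw : cs.dropWhile PySem.Chars.isdigit with _ | ⟨e, t⟩
        · exact ab_digit_all c cs hd h0
            (by simpa [List.all_eq_true] using List.dropWhile_eq_nil_iff.mp hdw)
        · have hed : PySem.Chars.isdigit e = false := dropWhile_head_false _ _ _ _ hdw
          have hcs : cs = cs.takeWhile PySem.Chars.isdigit ++ e :: t := by
            conv_lhs => rw [← List.takeWhile_append_dropWhile (p := PySem.Chars.isdigit) (l := cs)]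
            rw [hdw]
          have hds : ∀ a ∈ cs.takeWhile PySem.Chars.isdigit, PySem.Chars.isdigit a = true :=
            fun a ha => List.mem_takeWhile_imp ha
          rw [hcs]
          by_cases he : e = '.'
          · subst he; exact ab_digit_dot c _ t hd h0 hds
          · exact ab_digit_other c _ t e hd h0 hds hed he
    · exact ab_nondigit c cs (by simpa using hd)

-- ===== VERDICT (by name: the statement is the Claim_ definition above) =====
theorem automata_cte_spec : Claim_equal_automata_cte := by
  intro n _
  show automata_cte n = automata_cte_alt n
  exact ab_all n.toList
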